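-- pv_equiv track=rewrite | github.com/Hariyono20/SmartJob-Finder | app/api.py | expand_synonyms
-- ===== SOURCE A (Python) =====
-- def expand_synonyms(text):
--     synonyms = {
--         "developer": ["programmer", "engineer", "coder"],
--         "marketing": ["sales", "promosi", "penjualan"],
--         "designer": ["desain", "ux", "ui"]
--     }
--     words = text.split()
--     expanded = []
--     for word in words:
--         expanded.append(word)
--         for key, values in synonyms.items():
--             if word == key or word in values:
--                 expanded.extend(values)
--     # Remove duplicates but keep order
--     seen = set()
--     expanded_unique = []
--     for w in expanded:
--         if w not in seen:
--             seen.add(w)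
--             expanded_unique.append(w)
--     return ' '.join(expanded_unique)
-- ===== SOURCE B (Python) =====
-- _EXT = {}
-- for _key, _values in [
--     ("developer", ["programmer", "engineer", "coder"]),
--     ("marketing", ["sales", "promosi", "penjualan"]),
--     ("designer", ["desain", "ux", "ui"]),
-- ]:
--     _EXT[_key] = _values
--     for _v in _values:
--         _EXT[_v] = _values
--
--
-- def expand_synonyms(text):
--     # single streaming pass: dedup while expanding (no intermediate expanded list),
--     # synonym match via a precomputed reverse index instead of a per-word table scan
--     seen = set()
--     out = []
--     for word in text.split():
--         if word not in seen:
--             seen.add(word)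
--             out.append(word)
--         for v in _EXT.get(word, ()):
--             if v not in seen:
--                 seen.add(v)
--                 out.append(v)
--     return ' '.join(out)
-- ===== Notes on version B (the rewrite author's own statement) =====
-- stated objective: alternative
-- what changed: Fuses A's two staged passes (build full expanded list, then seen-set dedup pass) into one streaming pass that dedups while expanding, and replaces the per-word scan over all synonym entries with a precomputed reverse index mapping each key and value-word to its values list.
import Mathlib
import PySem

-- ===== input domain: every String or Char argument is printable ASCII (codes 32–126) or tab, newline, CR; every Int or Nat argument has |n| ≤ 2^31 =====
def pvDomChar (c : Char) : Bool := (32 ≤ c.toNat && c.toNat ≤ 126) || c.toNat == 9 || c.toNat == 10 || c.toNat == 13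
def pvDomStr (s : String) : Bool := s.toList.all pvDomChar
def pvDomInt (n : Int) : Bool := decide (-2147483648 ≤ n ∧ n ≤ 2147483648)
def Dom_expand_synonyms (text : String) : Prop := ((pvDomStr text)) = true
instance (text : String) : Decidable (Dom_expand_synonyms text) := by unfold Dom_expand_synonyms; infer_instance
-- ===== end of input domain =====

-- B fuses A's two staged passes (expand, then dedup) into one streaming dedup-while-
-- expanding pass, with a precomputed reverse index replacing the per-word table scan.

-- ===== PORT A =====
-- the literal 'synonyms' dict of A, as its items list (iterated in insertion order)
def synItemsA : List (String × List String) :=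
  [("developer", ["programmer", "engineer", "coder"]),
   ("marketing", ["sales", "promosi", "penjualan"]),
   ("designer", ["desain", "ux", "ui"])]

def expand_synonyms (text : String) : String :=
  let words := PySem.Str.split₀ text
  let expanded := words.foldl (fun acc word =>
    synItemsA.foldl (fun acc2 kv =>
      if word == kv.1 || kv.2.contains word then acc2 ++ kv.2 else acc2)
      (acc ++ [word])) []
  let fin := expanded.foldl
    (fun (st : PySem.Set String × List String) w =>
      if PySem.Set.contains st.1 w then st else (PySem.Set.add st.1 w, st.2 ++ [w]))
    (PySem.Set.empty, [])
  PySem.Str.join " " fin.2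

-- ===== PORT B =====
-- B's module-level precompute: reverse index over the same synonyms table
def extB : PySem.Dict String (List String) :=
  [("developer", ["programmer", "engineer", "coder"]),
   ("marketing", ["sales", "promosi", "penjualan"]),
   ("designer", ["desain", "ux", "ui"])].foldl
    (fun d kv => kv.2.foldl (fun d2 v => d2.insert v kv.2) (d.insert kv.1 kv.2))
    PySem.Dict.empty

-- the 'if w not in seen: seen.add(w); out.append(w)' step of B's single pass
def emitB (st : PySem.Set String × List String) (w : String) :
    PySem.Set String × List String :=
  if PySem.Set.contains st.1 w then st else (PySem.Set.add st.1 w, st.2 ++ [w])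

def expand_synonyms_alt (text : String) : String :=
  let fin := (PySem.Str.split₀ text).foldl
    (fun st word =>
      let st1 := emitB st word
      (extB.getD word []).foldl emitB st1)
    (PySem.Set.empty, [])
  PySem.Str.join " " fin.2

-- ===== PRECONDITION & SPEC =====
def Spec_expand_synonyms (text : String) (out : String) : Prop := out = expand_synonyms_alt text
instance (text : String) (out : String) : Decidable (Spec_expand_synonyms text out) := by unfold Spec_expand_synonyms; infer_instance

-- ===== CLAIM (what is proved, stated in full; the proofs are below) =====
def Claim_equal_expand_synonyms : Prop := ∀ (text : String), Dom_expand_synonyms text → Spec_expand_synonyms text (expand_synonyms text)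

-- ===== LEMMAS AND PROOFS =====

-- a word's chunk of A's expanded list: the word followed by its synonym values
def chunk (w : String) : List String := w :: extB.getD w []

-- per-word step: A's scan over the three entries appends exactly (extB.getD w [])
theorem step_eq (w : String) (acc : List String) :
    synItemsA.foldl (fun acc2 kv =>
      if w == kv.1 || kv.2.contains w then acc2 ++ kv.2 else acc2) acc
    = acc ++ extB.getD w [] := by
  by_cases h : w ∈ ["developer", "programmer", "engineer", "coder",
                    "marketing", "sales", "promosi", "penjualan",
                    "designer", "desain", "ux", "ui"]
  · fin_cases h <;> rfl
  · simp only [List.mem_cons, List.not_mem_nil, or_false, not_or] at h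
    obtain ⟨h1, h2, h3, h4, h5, h6, h7, h8, h9, h10, h11, h12⟩ := h
    have hkeys : extB.keys = ["developer", "programmer", "engineer", "coder",
        "marketing", "sales", "promosi", "penjualan",
        "designer", "desain", "ux", "ui"] := by decide
    have hget : extB.get? w = none := by
      rw [PySem.Dict.get?_eq_none_iff_not_mem_keys, hkeys]
      simp [h1, h2, h3, h4, h5, h6, h7, h8, h9, h10, h11, h12]
    have hgd : extB.getD w [] = [] := by simp [PySem.Dict.getD, hget]
    have c1 : (w == "developer" || ["programmer", "engineer", "coder"].contains w) = false := by
      simp [h1, h2, h3, h4]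
    have c2 : (w == "marketing" || ["sales", "promosi", "penjualan"].contains w) = false := by
      simp [h5, h6, h7, h8]
    have c3 : (w == "designer" || ["desain", "ux", "ui"].contains w) = false := by
      simp [h9, h10, h11, h12]
    simp only [synItemsA, hgd, List.foldl_cons, List.foldl_nil, c1, c2, c3,
      Bool.false_eq_true, if_false, List.append_nil]

-- A's expansion loop builds the concatenation of the per-word chunks
theorem expand_eq_flatMap (words : List String) (acc : List String) :
    words.foldl (fun acc word =>
      synItemsA.foldl (fun acc2 kv =>
        if word == kv.1 || kv.2.contains word then acc2 ++ kv.2 else acc2)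
        (acc ++ [word])) acc
    = acc ++ words.flatMap chunk := by
  induction words generalizing acc with
  | nil => simp
  | cons w ws ih =>
    rw [List.foldl_cons, step_eq, ih, List.flatMap_cons]
    simp [chunk]

-- folding A's dedup step over the chunk concatenation is B's fused per-word fold
theorem dedup_flatMap (words : List String) (st : PySem.Set String × List String) :
    (words.flatMap chunk).foldl emitB st
    = words.foldl (fun st word => (extB.getD word []).foldl emitB (emitB st word)) st := by
  induction words generalizing st with
  | nil => rfl
  | cons w ws ih =>
    simp only [List.flatMap_cons, List.foldl_append, List.foldl_cons, chunk, ih]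

-- ===== VERDICT (by name: the statement is the Claim_ definition above) =====
theorem expand_synonyms_spec : Claim_equal_expand_synonyms := by
  intro text _
  unfold Spec_expand_synonyms expand_synonyms expand_synonyms_alt
  simp only [expand_eq_flatMap, List.nil_append]
  rw [show (fun (st : PySem.Set String × List String) w =>
      if PySem.Set.contains st.1 w then st else (PySem.Set.add st.1 w, st.2 ++ [w])) = emitB
    from rfl]
  rw [dedup_flatMap]
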